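-- pv_equiv track=rewrite | github.com/ancilcleetus/Foundations-of-Computer-Science | Intermediate-DSA/Day-027-Intermediate-DSA-Classes-and-Objects/intermediate-dsa-classes-and-objects-q04.py | getCountOfSquares
-- ===== SOURCE A (Python) =====
-- class Rectangle:
--     def __init__(self, x, y):
--         self.length = x
--         self.breadth = y
--
--     def getArea(self):
--         return self.length * self.breadth
--
--     def isSquare(self):
--         return self.length == self.breadth
--
--     def isAreaGreaterThan(self, K):
--         return self.getArea() > K
--
-- def getCountOfSquares(A, B):
--     count_of_squares_data = []
--     rectangles = [Rectangle(x, y) for x, y in zip(A, B)]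
--     for i, (rectangle) in enumerate(rectangles):
--         count_of_squares = 0
--         area = rectangle.getArea()
--         for j in range(i):
--             if rectangles[j].isSquare() and rectangles[j].isAreaGreaterThan(area):
--                 count_of_squares += 1
--
--         count_of_squares_data.append(count_of_squares)
--
--     return count_of_squares_data
-- ===== SOURCE B (Python) =====
-- def _bisect_right(a, x):
--     # rightmost insertion point of x in sorted list a (hand-written, stdlib-free)
--     lo, hi = 0, len(a)
--     while lo < hi:
--         mid = (lo + hi) // 2
--         if x < a[mid]:
--             hi = mid
--         else:
--             lo = mid + 1
--     return lo
--
-- def getCountOfSquares(A, B):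
--     result = []
--     areas = []  # sorted list of areas of squares seen so far
--     for x, y in zip(A, B):
--         area = x * y
--         pos = _bisect_right(areas, area)
--         result.append(len(areas) - pos)
--         if x == y:
--             areas.insert(pos, area)
--     return result
-- ===== Notes on version B (the rewrite author's own statement) =====
-- stated objective: faster
-- what changed: B keeps the areas of squares seen so far in a sorted list and answers each query by binary search (count greater = len - bisect_right), instead of A's linear rescan of all prior rectangles per index.
import Mathlib
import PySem

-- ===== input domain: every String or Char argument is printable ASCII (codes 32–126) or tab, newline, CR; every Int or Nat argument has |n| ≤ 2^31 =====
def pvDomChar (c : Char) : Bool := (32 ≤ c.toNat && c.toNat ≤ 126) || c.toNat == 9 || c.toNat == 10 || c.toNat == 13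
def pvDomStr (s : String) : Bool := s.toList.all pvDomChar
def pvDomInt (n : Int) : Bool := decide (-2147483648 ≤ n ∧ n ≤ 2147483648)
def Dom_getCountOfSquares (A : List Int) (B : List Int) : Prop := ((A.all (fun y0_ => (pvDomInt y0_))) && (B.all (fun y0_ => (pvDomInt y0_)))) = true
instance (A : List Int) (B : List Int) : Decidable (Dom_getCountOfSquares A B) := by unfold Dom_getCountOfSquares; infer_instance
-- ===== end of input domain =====

-- B replaces A's quadratic rescan of all prior rectangles by a sorted list of the
-- areas of squares seen so far, queried by hand-written binary search (bisect_right).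

-- ===== PORT A =====
-- literal port: rectangles = zip A B, outer loop over enumerate, inner loop j in range(i)
-- indexing rectangles[j] (always in range, ported with pyGetD)
def getCountOfSquares (A : List Int) (B : List Int) : List Int :=
  let rectangles := List.zip A B
  (PySem.List.enumerate rectangles 0).foldl
    (fun acc ir =>
      let area := ir.2.1 * ir.2.2
      let count := (PySem.List.pyRange 0 ir.1 1).foldl
        (fun c j =>
          let r := PySem.List.pyGetD rectangles j (0, 0)
          if r.1 = r.2 ∧ r.1 * r.2 > area then c + 1 else c) (0 : Int)
      acc ++ [count]) []

-- ===== PORT B =====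
-- port of Source B's _bisect_right: lo and hi are nonnegative Python ints throughout,
-- ported as Nat ((lo+hi)//2 = Nat division on nonnegatives, exact); a[mid] has
-- 0 ≤ mid < hi ≤ len(a), so the in-range read is ported as getD; the while loop
-- is ported with a fuel counter (hi - lo shrinks each turn and starts at len(a),
-- so fuel len(a) is a pure totality guard and never changes the result)
def bisectLoop (a : List Int) (x : Int) : Nat → Nat → Nat → Nat
  | 0, lo, _hi => lo
  | fuel + 1, lo, hi =>
    if lo < hi then
      let mid := (lo + hi) / 2
      if x < a.getD mid 0 then bisectLoop a x fuel lo mid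
      else bisectLoop a x fuel (mid + 1) hi
    else lo

def bisectRight (a : List Int) (x : Int) : Nat := bisectLoop a x a.length 0 a.length

-- literal port of Source B: fold over zip A B with state (result, areas);
-- areas.insert(pos, area) is PySem.List.insert (0 ≤ pos ≤ len(areas))
def getCountOfSquares_alt (A : List Int) (B : List Int) : List Int :=
  ((List.zip A B).foldl
    (fun st xy =>
      let area := xy.1 * xy.2
      let pos := bisectRight st.2 area
      (st.1 ++ [(st.2.length : Int) - (pos : Int)],
       if xy.1 = xy.2 then PySem.List.insert st.2 (pos : Int) area else st.2))
    ([], [])).1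

-- ===== PRECONDITION & SPEC =====
def Spec_getCountOfSquares (A : List Int) (B : List Int) (out : List Int) : Prop := out = getCountOfSquares_alt A B
instance (A : List Int) (B : List Int) (out : List Int) : Decidable (Spec_getCountOfSquares A B out) := by unfold Spec_getCountOfSquares; infer_instance

-- ===== CLAIM (what is proved, stated in full; the proofs are below) =====
def Claim_equal_getCountOfSquares : Prop := ∀ (A : List Int) (B : List Int), Dom_getCountOfSquares A B → Spec_getCountOfSquares A B (getCountOfSquares A B)

-- ===== LEMMAS AND PROOFS =====

-- areas of the square rectangles in a prefix
def sqOf (pre : List (Int × Int)) : List Int :=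
  (pre.filter (fun r => decide (r.1 = r.2))).map (fun r => r.1 * r.2)

-- spine of B's fold: the list of counts it emits from state `sq` on remaining input
def goB (sq : List Int) : List (Int × Int) → List Int
  | [] => []
  | xy :: t =>
    let pos := bisectRight sq (xy.1 * xy.2)
    ((sq.length : Int) - (pos : Int)) ::
      goB (if xy.1 = xy.2 then PySem.List.insert sq (pos : Int) (xy.1 * xy.2) else sq) t

theorem B_fold_fst (l : List (Int × Int)) (res sq : List Int) :
    (l.foldl
      (fun st xy =>
        let area := xy.1 * xy.2
        let pos := bisectRight st.2 area
        (st.1 ++ [(st.2.length : Int) - (pos : Int)],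
         if xy.1 = xy.2 then PySem.List.insert st.2 (pos : Int) area else st.2))
      (res, sq)).1 = res ++ goB sq l := by
  induction l generalizing res sq with
  | nil => simp [goB]
  | cons xy t ih => simp [goB, ih]

theorem count_fold {α : Type} (l : List α) (p : α → Prop) [DecidablePred p] (c0 : Int) :
    l.foldl (fun c x => if p x then c + 1 else c) c0 = c0 + (l.countP (fun x => decide (p x)) : Int) := by
  induction l generalizing c0 with
  | nil => simp
  | cons x t ih =>
    simp only [List.foldl_cons, List.countP_cons, ih]
    by_cases h : p x <;> simp [h] <;> ring

theorem sqOf_snoc (pre : List (Int × Int)) (xy : Int × Int) :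
    sqOf (pre ++ [xy]) = if xy.1 = xy.2 then sqOf pre ++ [xy.1 * xy.2] else sqOf pre := by
  by_cases h : xy.1 = xy.2 <;> simp [sqOf, List.filter_append, h]

theorem count_sq (pre : List (Int × Int)) (a : Int) :
    (sqOf pre).countP (fun s => decide (s > a))
      = pre.countP (fun r => decide (r.1 = r.2 ∧ r.1 * r.2 > a)) := by
  induction pre with
  | nil => rfl
  | cons r t ih =>
    by_cases h : r.1 = r.2 <;>
      simp [sqOf, List.countP_cons, h] at ih ⊢ <;>
      [by_cases h2 : r.1 * r.2 > a <;> simp [ih]; simp [ih]]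

-- A's inner loop over range(pre.length) indexing into pre ++ suf counts exactly over pre
theorem A_inner (pre suf : List (Int × Int)) (a : Int) :
    (PySem.List.pyRange 0 (pre.length : Int) 1).foldl
      (fun c j =>
        if (PySem.List.pyGetD (pre ++ suf) j (0, 0)).1 = (PySem.List.pyGetD (pre ++ suf) j (0, 0)).2 ∧
            (PySem.List.pyGetD (pre ++ suf) j (0, 0)).1 * (PySem.List.pyGetD (pre ++ suf) j (0, 0)).2 > a
        then c + 1 else c) (0 : Int)
    = (pre.countP (fun r => decide (r.1 = r.2 ∧ r.1 * r.2 > a)) : Int) := by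
  have hc := PySem.List.foldl_congr_mem (PySem.List.pyRange 0 (pre.length : Int) 1)
      (fun (c : Int) j =>
        if (PySem.List.pyGetD (pre ++ suf) j (0, 0)).1 = (PySem.List.pyGetD (pre ++ suf) j (0, 0)).2 ∧
            (PySem.List.pyGetD (pre ++ suf) j (0, 0)).1 * (PySem.List.pyGetD (pre ++ suf) j (0, 0)).2 > a
        then c + 1 else c)
      (fun (c : Int) j =>
        if (PySem.List.pyGetD pre j (0, 0)).1 = (PySem.List.pyGetD pre j (0, 0)).2 ∧
            (PySem.List.pyGetD pre j (0, 0)).1 * (PySem.List.pyGetD pre j (0, 0)).2 > a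
        then c + 1 else c) 0
      (by
        intro acc j hj
        rw [PySem.List.mem_pyRange_one] at hj
        dsimp only
        have hlt : j < ((pre ++ suf).length : Int) := by
          simp only [List.length_append]
          push_cast
          omega
        rw [PySem.List.pyGetD_eq_getElem (pre ++ suf) (0, 0) hj.1 hlt,
            PySem.List.pyGetD_eq_getElem pre (0, 0) hj.1 (by exact_mod_cast hj.2),
            List.getElem_append_left _])
  rw [hc, PySem.List.foldl_pyRange_zero_pyGetD' pre (0, 0)
        (fun c (r : Int × Int) => if r.1 = r.2 ∧ r.1 * r.2 > a then c + 1 else c) 0,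
      count_fold pre (fun r => r.1 = r.2 ∧ r.1 * r.2 > a) 0]
  simp

-- ---- sorted-list facts ----

-- in a sorted list, the first countP(≤x) elements are ≤ x and the rest are > x
theorem sorted_split (a : List Int) (x : Int) (h : a.Pairwise (· ≤ ·)) :
    (∀ p ∈ a.take (a.countP (fun s => decide (s ≤ x))), p ≤ x) ∧
    (∀ p ∈ a.drop (a.countP (fun s => decide (s ≤ x))), x < p) := by
  induction a with
  | nil => simp
  | cons y t ih =>
    rcases List.pairwise_cons.1 h with ⟨hy, ht⟩
    by_cases hyx : y ≤ x
    · have hcount : (y :: t).countP (fun s => decide (s ≤ x))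
          = t.countP (fun s => decide (s ≤ x)) + 1 := by
        simp [hyx]
      rw [hcount]
      obtain ⟨ih1, ih2⟩ := ih ht
      refine ⟨?_, ?_⟩
      · intro p hp
        simp only [List.take_succ_cons, List.mem_cons] at hp
        rcases hp with rfl | hp
        · exact hyx
        · exact ih1 p hp
      · intro p hp
        simpa using ih2 p (by simpa using hp)
    · have hall : ∀ p ∈ y :: t, x < p := by
        intro p hp
        rcases List.mem_cons.1 hp with rfl | hp
        · omega
        · have := hy p hp; omega
      have hcount : (y :: t).countP (fun s => decide (s ≤ x)) = 0 := by
        rw [List.countP_eq_zero]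
        intro p hp
        simpa using not_le.2 (hall p hp)
      rw [hcount]
      exact ⟨by simp, by simpa using hall⟩

theorem sorted_getD_le_iff (a : List Int) (x : Int) (h : a.Pairwise (· ≤ ·))
    (i : Nat) (hi : i < a.length) :
    (a.getD i 0 ≤ x ↔ i < a.countP (fun s => decide (s ≤ x))) := by
  obtain ⟨h1, h2⟩ := sorted_split a x h
  set c := a.countP (fun s => decide (s ≤ x)) with hc
  have hcl : c ≤ a.length := List.countP_le_length
  rw [List.getD_eq_getElem a 0 hi]
  constructor
  · intro hle
    by_contra hlt
    rw [not_lt] at hlt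
    have hmem : a[i] ∈ a.drop c := by
      have : (a.drop c)[i - c]'(by simp; omega) = a[i] := by
        rw [List.getElem_drop]; congr 1; omega
      rw [← this]; exact List.getElem_mem _
    have := h2 _ hmem
    omega
  · intro hlt
    have hmem : a[i] ∈ a.take c := by
      have : (a.take c)[i]'(by simp; omega) = a[i] := List.getElem_take
      rw [← this]; exact List.getElem_mem _
    exact h1 _ hmem

-- binary search returns countP(≤x) on a sorted list
theorem bisect_aux (a : List Int) (x : Int) (h : a.Pairwise (· ≤ ·)) :
    ∀ (k lo hi : Nat), hi - lo ≤ k → hi ≤ a.length →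
      lo ≤ a.countP (fun s => decide (s ≤ x)) →
      a.countP (fun s => decide (s ≤ x)) ≤ hi →
      bisectLoop a x k lo hi = a.countP (fun s => decide (s ≤ x)) := by
  intro k
  induction k with
  | zero =>
    intro lo hi hk _ hlo hhi
    simp only [bisectLoop]
    omega
  | succ k ih =>
    intro lo hi hk hlen hlo hhi
    simp only [bisectLoop]
    by_cases hlh : lo < hi
    · rw [if_pos hlh]
      set mid := (lo + hi) / 2 with hmid
      have hmlt : mid < hi := by omega
      have hmge : lo ≤ mid := by omega
      have hiff := sorted_getD_le_iff a x h mid (by omega)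
      by_cases hx : x < a.getD mid 0
      · rw [if_pos hx]
        have : ¬ a.getD mid 0 ≤ x := by omega
        have hcm : a.countP (fun s => decide (s ≤ x)) ≤ mid := by
          by_contra hcon; exact this (hiff.2 (by omega))
        exact ih lo mid (by omega) (by omega) hlo hcm
      · rw [if_neg hx]
        have hle : a.getD mid 0 ≤ x := by omega
        have hcm : mid < a.countP (fun s => decide (s ≤ x)) := hiff.1 hle
        exact ih (mid + 1) hi (by omega) hlen (by omega) hhi
    · rw [if_neg hlh]
      omega

theorem bisect_correct (a : List Int) (x : Int) (h : a.Pairwise (· ≤ ·)) :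
    bisectRight a x = a.countP (fun s => decide (s ≤ x)) := by
  exact bisect_aux a x h a.length 0 a.length (by omega) le_rfl (by omega)
    List.countP_le_length

theorem countP_le_add_gt (a : List Int) (x : Int) :
    a.countP (fun s => decide (s ≤ x)) + a.countP (fun s => decide (x < s)) = a.length := by
  induction a with
  | nil => rfl
  | cons y t ih =>
    simp only [List.countP_cons, List.length_cons]
    by_cases hy : y ≤ x
    · have h2 : ¬ (y > x) := by omega
      simp [hy, h2]
      omega
    · have h2 : y > x := by omega
      simp [hy, h2]
      omega

-- inserting x at position countP(≤x) keeps the list sorted, and is a permutation of x :: a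
theorem insert_sorted (a : List Int) (x : Int) (h : a.Pairwise (· ≤ ·)) :
    (PySem.List.insert a ((a.countP (fun s => decide (s ≤ x)) : Nat) : Int) x).Pairwise (· ≤ ·) ∧
    (PySem.List.insert a ((a.countP (fun s => decide (s ≤ x)) : Nat) : Int) x).Perm (x :: a) := by
  set c := a.countP (fun s => decide (s ≤ x)) with hc
  have hcl : c ≤ a.length := List.countP_le_length
  rw [PySem.List.insert_natCast a c x hcl]
  obtain ⟨h1, h2⟩ := sorted_split a x h
  constructor
  · rw [List.pairwise_append]
    refine ⟨(List.pairwise_append.1 ((List.take_append_drop c a).symm ▸ h)).1, ?_, ?_⟩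
    · rw [List.pairwise_cons]
      exact ⟨fun p hp => le_of_lt (h2 p hp),
        (List.pairwise_append.1 ((List.take_append_drop c a).symm ▸ h)).2.1⟩
    · intro u hu v hv
      rcases List.mem_cons.1 hv with rfl | hv
      · exact h1 u hu
      · exact le_trans (h1 u hu) (le_of_lt (h2 v hv))
  · have hmid := List.perm_middle (a := x) (l₁ := a.take c) (l₂ := a.drop c)
    rw [List.take_append_drop] at hmid
    exact hmid

-- the main induction: from any sorted permutation `sq` of sqOf pre, B's spine
-- reproduces A's per-index counts
theorem main_lemma (suf pre : List (Int × Int)) (sq : List Int)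
    (hperm : sq.Perm (sqOf pre)) (hsort : sq.Pairwise (· ≤ ·)) :
    (PySem.List.enumerate suf (pre.length : Int)).map
      (fun ir =>
        (PySem.List.pyRange 0 ir.1 1).foldl
          (fun c j =>
            if (PySem.List.pyGetD (pre ++ suf) j (0, 0)).1 = (PySem.List.pyGetD (pre ++ suf) j (0, 0)).2 ∧
                (PySem.List.pyGetD (pre ++ suf) j (0, 0)).1 * (PySem.List.pyGetD (pre ++ suf) j (0, 0)).2 > ir.2.1 * ir.2.2
            then c + 1 else c) (0 : Int))
    = goB sq suf := by
  induction suf generalizing pre sq with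
  | nil => simp [PySem.List.enumerate, goB]
  | cons xy t ih =>
    rw [PySem.List.enumerate_cons]
    simp only [List.map_cons, goB]
    have hbis : bisectRight sq (xy.1 * xy.2)
        = sq.countP (fun s => decide (s ≤ xy.1 * xy.2)) := bisect_correct _ _ hsort
    congr 1
    · rw [A_inner pre (xy :: t) (xy.1 * xy.2)]
      rw [← count_sq pre (xy.1 * xy.2), ← hperm.countP_eq]
      have hsum := countP_le_add_gt sq (xy.1 * xy.2)
      have hlen := hperm.length_eq
      have hgt : (sq.countP fun s => decide (s > xy.1 * xy.2))
          = sq.countP fun s => decide (xy.1 * xy.2 < s) := rfl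
      rw [hbis]
      omega
    · have happ : pre ++ xy :: t = (pre ++ [xy]) ++ t := by simp
      have hlen : ((pre.length : Int) + 1) = (((pre ++ [xy]).length : Int)) := by simp
      rw [happ, hlen, hbis]
      by_cases hsq : xy.1 = xy.2
      · rw [if_pos hsq]
        obtain ⟨hs', hp'⟩ := insert_sorted sq (xy.1 * xy.2) hsort
        refine ih (pre ++ [xy]) _ ?_ hs'
        rw [sqOf_snoc, if_pos hsq]
        refine hp'.trans ((hperm.cons _).trans ?_)
        simpa using (List.perm_middle (l₁ := sqOf pre) (l₂ := ([] : List Int))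
          (a := xy.1 * xy.2)).symm
      · rw [if_neg hsq]
        refine ih (pre ++ [xy]) sq ?_ hsort
        rw [sqOf_snoc, if_neg hsq]
        exact hperm

-- ===== VERDICT (by name: the statement is the Claim_ definition above) =====
theorem getCountOfSquares_spec : Claim_equal_getCountOfSquares := by
  intro A B _
  unfold Spec_getCountOfSquares getCountOfSquares getCountOfSquares_alt
  rw [B_fold_fst, PySem.List.foldl_append_singleton_eq_map]
  simpa using main_lemma (List.zip A B) [] [] (by simp [sqOf]) (by simp)
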